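-- pv_equiv track=rewrite | github.com/DavidJ-Saving-Time/sqlite-books | import.py | title_sort
-- ===== SOURCE A (Python) =====
-- def title_sort(title: str) -> str:
--     """Emulate Calibre's title_sort function."""
--     if not title:
--         return ''
--     title = title.strip()
--     articles = ['a', 'an', 'the']
--     for article in articles:
--         if title.lower().startswith(article + ' '):
--             return title[len(article):].strip() + ', ' + article.capitalize()
--     return title
-- ===== SOURCE B (Python) =====
-- # Single character-level pass driving a trie (DFA) of the leading articles,
-- # instead of three lowercase-startswith scans over the whole title.
-- _TRIE = (None, {'a': ('A', {'n': ('An', {})}),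
--                 't': (None, {'h': (None, {'e': ('The', {})})})})
--
--
-- def title_sort(title: str) -> str:
--     """Emulate Calibre's title_sort function."""
--     if not title:
--         return ''
--     title = title.strip()
--     node = _TRIE
--     for i, ch in enumerate(title):
--         if ch == ' ':
--             if node[0] is not None:
--                 return title[i + 1:].strip() + ', ' + node[0]
--             return title
--         child = node[1].get(ch.lower())
--         if child is None:
--             return title
--         node = child
--     return title
-- ===== Notes on version B (the rewrite author's own statement) =====
-- stated objective: alternative
-- what changed: Replaces A's loop of three lowercase-startswith scans over the whole title by a single character-level pass that drives a trie (DFA) of the articles, returning at the first space (accepting state moves the article) or first mismatching character.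
import Mathlib
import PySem

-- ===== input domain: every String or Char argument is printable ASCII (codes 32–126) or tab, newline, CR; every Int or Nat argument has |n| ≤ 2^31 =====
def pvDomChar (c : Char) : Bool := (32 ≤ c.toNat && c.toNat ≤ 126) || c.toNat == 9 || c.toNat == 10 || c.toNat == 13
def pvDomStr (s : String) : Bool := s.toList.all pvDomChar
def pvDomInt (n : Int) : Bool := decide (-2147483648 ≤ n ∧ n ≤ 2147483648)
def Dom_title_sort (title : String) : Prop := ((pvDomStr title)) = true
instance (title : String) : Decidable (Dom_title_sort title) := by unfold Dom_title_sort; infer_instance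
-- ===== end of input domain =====

-- B replaces A's three lowercase-startswith scans by one character-level pass that drives a
-- trie (DFA) of the articles and stops at the first space or mismatch; objective: alternative.

-- exact port of Python's str.capitalize() on ASCII: first char uppercased, rest lowercased
def pyCapitalize (cs : List Char) : List Char :=
  match cs with
  | [] => []
  | c :: rest => PySem.Chars.upperChar c :: PySem.Chars.lower rest

-- ===== PORT A =====
-- the `for article in articles` loop of A
def titleSortLoopA (t : List Char) : List (List Char) → List Char
  | [] => t
  | article :: more =>
    if PySem.Chars.startswith (PySem.Chars.lower t) (article ++ [' ']) then
      PySem.Chars.strip (PySem.List.slice t (some (PySem.List.len article)) none)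
        ++ [',', ' '] ++ pyCapitalize article
    else titleSortLoopA t more

def title_sort (title : String) : String :=
  if title.toList.isEmpty then "" else
  String.ofList (titleSortLoopA (PySem.Chars.strip title.toList)
    [['a'], ['a', 'n'], ['t', 'h', 'e']])

-- ===== PORT B =====
-- the states of B's article trie _TRIE (root; after 'a'; 'an'; 't'; 'th'; 'the')
inductive BState | root | sA | sAN | sT | sTH | sTHE
deriving DecidableEq, Repr

-- node[0] of Source B's trie node: the capitalized article at an accepting node
def bAccept : BState → Option (List Char)
  | .sA => some ['A']
  | .sAN => some ['A', 'n']
  | .sTHE => some ['T', 'h', 'e']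
  | _ => none

-- node[1].get(ch): the child edge of Source B's trie node
def bChild : BState → Char → Option BState
  | .root, c => if c = 'a' then some .sA else if c = 't' then some .sT else none
  | .sA, c => if c = 'n' then some .sAN else none
  | .sT, c => if c = 'h' then some .sTH else none
  | .sTH, c => if c = 'e' then some .sTHE else none
  | _, _ => none

-- the `for i, ch in enumerate(title)` loop of Source B: full is the stripped title, i the index of ch
def bLoop (full : List Char) : List Char → BState → Nat → List Char
  | [], _, _ => full
  | c :: rest, node, i =>
    if c = ' ' then
      match bAccept node with
      | some art =>
          PySem.Chars.strip (PySem.List.slice full (some ((i : Int) + 1)) none)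
            ++ [',', ' '] ++ art
      | none => full
    else
      match bChild node (PySem.Chars.lowerChar c) with
      | some child => bLoop full rest child (i + 1)
      | none => full

def title_sort_alt (title : String) : String :=
  if title.toList.isEmpty then "" else
  let t := PySem.Chars.strip title.toList
  String.ofList (bLoop t t .root 0)

-- ===== PRECONDITION & SPEC =====
def Spec_title_sort (title : String) (out : String) : Prop := out = title_sort_alt title
instance (title : String) (out : String) : Decidable (Spec_title_sort title out) := by unfold Spec_title_sort; infer_instance

-- ===== CLAIM (what is proved, stated in full; the proofs are below) =====
def Claim_equal_title_sort : Prop := ∀ (title : String), Dom_title_sort title → Spec_title_sort title (title_sort title)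

-- ===== LEMMAS AND PROOFS =====

-- common middle form: (first word before the first space, whether a space occurs, the remainder)
def partitionSpace (t : List Char) : List Char × Bool × List Char :=
  match t.dropWhile (· ≠ ' ') with
  | [] => (t, false, [])
  | _ :: rest => (t.takeWhile (· ≠ ' '), true, rest)

def midForm (t : List Char) : List Char :=
  let p := partitionSpace t
  let fl := PySem.Chars.lower p.1
  if p.2.1 && (fl = ['a'] || fl = ['a', 'n'] || fl = ['t', 'h', 'e']) then
    PySem.Chars.strip p.2.2 ++ [',', ' '] ++ pyCapitalize fl
  else t

-- only ' ' lowercases to ' '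
lemma lowerChar_eq_space {c : Char} (h : PySem.Chars.lowerChar c = ' ') : c = ' ' := by
  unfold PySem.Chars.lowerChar at h
  split at h
  · rename_i hu
    unfold PySem.Chars.isupper at hu
    simp [Char.le_def, UInt32.le_iff_toNat_le] at hu
    have hu' : 65 ≤ c.toNat ∧ c.toNat ≤ 90 := hu
    have hv : Nat.isValidChar (c.toNat + 32) := by left; omega
    have h2 := congrArg Char.toNat h
    simp [Char.ofNat, hv, Char.ofNatAux] at h2
    have h32 : (' ' : Char).toNat = 32 := by decide
    omega
  · exact h

lemma space_not_mem_lower {f : List Char} (hf : ' ' ∉ f) :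
    ' ' ∉ PySem.Chars.lower f := by
  unfold PySem.Chars.lower
  intro hmem
  obtain ⟨c, hc, hce⟩ := List.mem_map.mp hmem
  exact hf (lowerChar_eq_space hce ▸ hc)

-- a space-free word followed by ' ' is a prefix of f ++ ' ' :: r (f space-free) exactly when f = w
lemma prefix_word_space {w f : List Char} (r : List Char) (hw : ' ' ∉ w) (hf : ' ' ∉ f) :
    (w ++ [' ']) <+: (f ++ ' ' :: r) ↔ f = w := by
  induction w generalizing f with
  | nil =>
    cases f with
    | nil => simp
    | cons c f' =>
      simp only [List.nil_append, List.cons_append, List.cons_prefix_cons]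
      constructor
      · rintro ⟨hc, -⟩
        exact absurd (hc ▸ List.mem_cons_self) hf
      · intro h; cases h
  | cons a w' ih =>
    cases f with
    | nil =>
      simp only [List.cons_append, List.nil_append, List.cons_prefix_cons]
      constructor
      · rintro ⟨hc, -⟩
        exact absurd (by simp [hc]) hw
      · intro h; cases h
    | cons c f' =>
      have hw' : ' ' ∉ w' := fun h => hw (List.mem_cons_of_mem _ h)
      have hf' : ' ' ∉ f' := fun h => hf (List.mem_cons_of_mem _ h)
      simp only [List.cons_append, List.cons_prefix_cons, ih hw' hf']
      constructor
      · rintro ⟨h1, h2⟩; rw [h1, h2]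
      · intro h; injection h with h1 h2; exact ⟨h1.symm, h2⟩

-- A's startswith test, on a title whose first word (before the first ' ') is `first`
lemma startswith_iff_first {first w : List Char} (rest : List Char)
    (hf : ' ' ∉ first) (hw : ' ' ∉ w) :
    PySem.Chars.startswith (PySem.Chars.lower (first ++ ' ' :: rest)) (w ++ [' ']) = true
      ↔ PySem.Chars.lower first = w := by
  have hsp : PySem.Chars.lowerChar ' ' = ' ' := by decide
  rw [PySem.Chars.startswith_iff]
  show (w ++ [' ']) <+: PySem.Chars.lower (first ++ ' ' :: rest) ↔ _
  unfold PySem.Chars.lower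
  rw [List.map_append, List.map_cons, hsp]
  exact prefix_word_space _ hw (space_not_mem_lower hf)

-- A's startswith test is false when the stripped title contains no ' '
lemma startswith_false_no_space {t : List Char} (w : List Char) (ht : ' ' ∉ t) :
    PySem.Chars.startswith (PySem.Chars.lower t) (w ++ [' ']) = false := by
  rw [Bool.eq_false_iff]
  intro h
  rw [PySem.Chars.startswith_iff] at h
  have hmem : ' ' ∈ PySem.Chars.lower t := h.mem (by simp)
  unfold PySem.Chars.lower at hmem
  obtain ⟨c, hc, hce⟩ := List.mem_map.mp hmem
  exact ht (lowerChar_eq_space hce ▸ hc)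

lemma strip_cons_space (xs : List Char) :
    PySem.Chars.strip (' ' :: xs) = PySem.Chars.strip xs := by
  unfold PySem.Chars.strip PySem.Chars.lstrip
  rw [List.dropWhile_cons_of_pos (by decide)]

-- A's branch output equals the middle form's, when the first word lowercases to the article w
lemma branch_output_eq {first w : List Char} (rest : List Char)
    (hfw : PySem.Chars.lower first = w) :
    PySem.Chars.strip (PySem.List.slice (first ++ ' ' :: rest) (some (PySem.List.len w)) none)
      = PySem.Chars.strip rest := by
  have hlen : first.length = w.length := by
    rw [← hfw]; unfold PySem.Chars.lower; simp
  rw [PySem.List.len_eq, PySem.List.slice_from_natCast, ← hlen, List.drop_left,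
    strip_cons_space]

lemma dropWhile_head_false {p : Char → Bool} {t : List Char} {c : Char} {rest : List Char}
    (h : List.dropWhile p t = c :: rest) : p c = false := by
  induction t with
  | nil => simp at h
  | cons a t ih =>
    rw [List.dropWhile_cons] at h
    by_cases hp : p a
    · exact ih (by simpa [hp] using h)
    · simp only [hp, Bool.false_eq_true, if_false] at h
      injection h with h1 _
      rw [← h1]
      simpa using hp

-- A's loop computes the middle form
lemma loop_eq_mid (t : List Char) :
    titleSortLoopA t [['a'], ['a', 'n'], ['t', 'h', 'e']] = midForm t := by
  unfold midForm
  cases hd : t.dropWhile (· ≠ ' ') with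
  | nil =>
    have ht : ' ' ∉ t := by
      intro hm
      exact absurd ((List.dropWhile_eq_nil_iff).mp hd ' ' hm) (by decide)
    unfold partitionSpace
    rw [hd]
    simp only [titleSortLoopA]
    rw [startswith_false_no_space ['a'] ht, startswith_false_no_space ['a', 'n'] ht,
      startswith_false_no_space ['t', 'h', 'e'] ht]
    simp
  | cons c rest =>
    have hc : c = ' ' := by
      have := dropWhile_head_false hd
      simpa using this
    subst hc
    have ht : t = t.takeWhile (· ≠ ' ') ++ ' ' :: rest := by
      conv_lhs => rw [← List.takeWhile_append_dropWhile (p := (· ≠ ' ')) (l := t), hd]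
    have hf : ' ' ∉ t.takeWhile (· ≠ ' ') := by
      intro hm
      have := List.mem_takeWhile_imp hm
      simp at this
    unfold partitionSpace
    rw [hd]
    simp only []
    set first := t.takeWhile (· ≠ ' ') with hfirst
    set fl := PySem.Chars.lower first with hfl
    have cond : ∀ w : List Char, ' ' ∉ w →
        PySem.Chars.startswith (PySem.Chars.lower t) (w ++ [' ']) = decide (fl = w) := by
      intro w hw
      rw [ht]
      by_cases h : fl = w
      · rw [decide_eq_true h, (startswith_iff_first rest hf hw).mpr h]
      · rw [decide_eq_false h, Bool.eq_false_iff]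
        intro hc
        exact h ((startswith_iff_first rest hf hw).mp hc)
    simp only [titleSortLoopA]
    rw [cond ['a'] (by decide), cond ['a', 'n'] (by decide), cond ['t', 'h', 'e'] (by decide)]
    by_cases h1 : fl = ['a']
    · rw [ht, if_pos (by simp [h1]), if_pos (by simp [h1]), branch_output_eq rest h1, h1]
    by_cases h2 : fl = ['a', 'n']
    · rw [ht, if_neg (by simp [h1]), if_pos (by simp [h2]), if_pos (by simp [h2]),
        branch_output_eq rest h2, h2]
    by_cases h3 : fl = ['t', 'h', 'e']
    · rw [ht, if_neg (by simp [h1]), if_neg (by simp [h2]), if_pos (by simp [h3]),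
        if_pos (by simp [h3]), branch_output_eq rest h3, h3]
    · rw [if_neg (by simp [h1]), if_neg (by simp [h2]), if_neg (by simp [h3]),
        if_neg (by simp [h1, h2, h3])]

-- the trie walk bLoop performs over a space-free word (chars lowered as in bLoop)
def walk : BState → List Char → Option BState
  | n, [] => some n
  | n, c :: cs =>
    match bChild n (PySem.Chars.lowerChar c) with
    | some n' => walk n' cs
    | none => none

-- bLoop never leaves full on a space-free suffix
lemma bLoop_no_space (full : List Char) :
    ∀ (w : List Char) (node : BState) (i : Nat), ' ' ∉ w → bLoop full w node i = full := by
  intro w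
  induction w with
  | nil => intro node i _; rfl
  | cons c rest ih =>
    intro node i hw
    have hc : ¬ c = ' ' := fun h => hw (by simp [h])
    simp only [bLoop, if_neg hc]
    cases bChild node (PySem.Chars.lowerChar c) with
    | none => rfl
    | some child => exact ih child (i + 1) (fun h => hw (List.mem_cons_of_mem _ h))

-- bLoop on a word followed by a space = walk the trie over the word, then accept at the space
lemma bLoop_walk (full r : List Char) :
    ∀ (w : List Char) (node : BState) (i : Nat), ' ' ∉ w →
    bLoop full (w ++ ' ' :: r) node i =
      (match (walk node w).bind bAccept with
       | some art =>
           PySem.Chars.strip (PySem.List.slice full (some (((i + w.length : Nat) : Int) + 1)) none)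
             ++ [',', ' '] ++ art
       | none => full) := by
  intro w
  induction w with
  | nil =>
    intro node i _
    simp only [List.nil_append, bLoop, if_pos rfl, walk, Option.bind, List.length_nil,
      Nat.add_zero]
    cases bAccept node <;> rfl
  | cons c rest ih =>
    intro node i hw
    have hc : ¬ c = ' ' := fun h => hw (by simp [h])
    simp only [List.cons_append, bLoop, if_neg hc, walk]
    cases bChild node (PySem.Chars.lowerChar c) with
    | none => rfl
    | some child =>
      dsimp only
      rw [ih child (i + 1) (fun h => hw (List.mem_cons_of_mem _ h)), List.length_cons]
      have : i + 1 + rest.length = i + (rest.length + 1) := by omega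
      rw [this]

-- the trie accepts exactly the three articles
lemma walk_accept (w : List Char) :
    (walk .root w).bind bAccept =
      (if PySem.Chars.lower w = ['a'] then some ['A']
       else if PySem.Chars.lower w = ['a', 'n'] then some ['A', 'n']
       else if PySem.Chars.lower w = ['t', 'h', 'e'] then some ['T', 'h', 'e']
       else none) := by
  match w with
  | [] => simp [walk, bAccept, PySem.Chars.lower]
  | [c] =>
    simp only [walk, bChild, PySem.Chars.lower, List.map]
    split_ifs with h1 h2 <;> simp_all [walk, bAccept]
  | [c, d] =>
    simp only [walk, bChild, PySem.Chars.lower, List.map]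
    split_ifs <;> simp_all [walk, bChild, bAccept] <;> split_ifs <;> simp_all [walk, bAccept]
  | [c, d, e] =>
    simp only [walk, bChild, PySem.Chars.lower, List.map]
    split_ifs <;> simp_all [walk, bChild, bAccept] <;> split_ifs <;>
      simp_all [walk, bAccept]
  | c :: d :: e :: f :: rest =>
    have hne : ∀ (l : List Char), PySem.Chars.lower (c :: d :: e :: f :: rest) ≠ l ∨ 4 ≤ l.length := by
      intro l
      by_cases h : PySem.Chars.lower (c :: d :: e :: f :: rest) = l
      · right; rw [← h]; unfold PySem.Chars.lower; simp
      · left; exact h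
    have h1 : PySem.Chars.lower (c :: d :: e :: f :: rest) ≠ ['a'] := by
      rcases hne ['a'] with h | h; exact h; simp at h
    have h2 : PySem.Chars.lower (c :: d :: e :: f :: rest) ≠ ['a', 'n'] := by
      rcases hne ['a', 'n'] with h | h; exact h; simp at h
    have h3 : PySem.Chars.lower (c :: d :: e :: f :: rest) ≠ ['t', 'h', 'e'] := by
      rcases hne ['t', 'h', 'e'] with h | h; exact h; simp at h
    rw [if_neg h1, if_neg h2, if_neg h3]
    simp only [walk, bChild]
    split_ifs <;> simp_all [walk, bChild, bAccept] <;> split_ifs <;>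
      simp_all [walk, bChild, bAccept] <;> split_ifs <;> simp_all [walk, bChild, bAccept]

lemma strip_drop_eq {first : List Char} (rest : List Char) :
    PySem.Chars.strip (PySem.List.slice (first ++ ' ' :: rest)
        (some (((0 + first.length : Nat) : Int) + 1)) none)
      = PySem.Chars.strip rest := by
  have : (((0 + first.length : Nat) : Int) + 1) = ((first.length + 1 : Nat) : Int) := by
    push_cast; ring
  rw [this, PySem.List.slice_from_natCast]
  have hd : (first ++ ' ' :: rest).drop (first.length + 1) = rest := by
    have h1 : first.length + 1 = (first ++ [' ']).length := by simp
    have h2 : first ++ ' ' :: rest = (first ++ [' ']) ++ rest := by simp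
    rw [h1, h2, List.drop_left]
  rw [hd]

-- B's loop computes the middle form
lemma bLoop_eq_mid (t : List Char) : bLoop t t .root 0 = midForm t := by
  unfold midForm
  cases hd : t.dropWhile (· ≠ ' ') with
  | nil =>
    have ht : ' ' ∉ t := by
      intro hm
      exact absurd ((List.dropWhile_eq_nil_iff).mp hd ' ' hm) (by decide)
    unfold partitionSpace
    rw [hd]
    simp only [Bool.false_and, Bool.false_eq_true, if_false]
    exact bLoop_no_space t t .root 0 ht
  | cons c rest =>
    have hc : c = ' ' := by
      have := dropWhile_head_false hd
      simpa using this
    subst hc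
    have ht : t = t.takeWhile (· ≠ ' ') ++ ' ' :: rest := by
      conv_lhs => rw [← List.takeWhile_append_dropWhile (p := (· ≠ ' ')) (l := t), hd]
    have hf : ' ' ∉ t.takeWhile (· ≠ ' ') := by
      intro hm
      have := List.mem_takeWhile_imp hm
      simp at this
    unfold partitionSpace
    rw [hd]
    simp only []
    set first := t.takeWhile (· ≠ ' ') with hfirst
    set fl := PySem.Chars.lower first with hfl
    rw [ht]
    rw [bLoop_walk (first ++ ' ' :: rest) rest first .root 0 hf, walk_accept, ← hfl]
    by_cases h1 : fl = ['a']
    · rw [if_pos h1, if_pos (by simp [h1]), strip_drop_eq rest, h1]; rfl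
    by_cases h2 : fl = ['a', 'n']
    · rw [if_neg h1, if_pos h2, if_pos (by simp [h2]), strip_drop_eq rest, h2]; rfl
    by_cases h3 : fl = ['t', 'h', 'e']
    · rw [if_neg h1, if_neg h2, if_pos h3, if_pos (by simp [h3]), strip_drop_eq rest, h3]; rfl
    · rw [if_neg h1, if_neg h2, if_neg h3, if_neg (by simp [h1, h2, h3])]

-- ===== VERDICT (by name: the statement is the Claim_ definition above) =====
theorem title_sort_spec : Claim_equal_title_sort := by
  intro title _
  unfold Spec_title_sort title_sort title_sort_alt
  by_cases he : title.toList.isEmpty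
  · simp [he]
  · simp only [he, if_false, Bool.false_eq_true]
    rw [loop_eq_mid, ← bLoop_eq_mid]
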